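-- pv_equiv track=rewrite | github.com/sinkyoungdeok/ps | 이코테/dfs&bfs/18.괄호-변환.py | convert
-- ===== SOURCE A (Python) =====
-- def isGood(s):
--     left = 0
--     right = 0
--     stack = []
--     for i in range(0, len(s)):
--         if s[i] == "(":
--             left += 1
--             stack.append(s[i])
--         else:
--             right += 1
--             if len(stack) == 0:
--                 return False
--             else:
--                 stack.pop()
--     if left == right and len(stack) == 0:
--         return True
--     else:
--         return False
--
-- def convert(s):
--     # 1
--     if len(s) == 0:
--         return s
--     # 2
--     left = 0
--     right = 0
--     if s[0] == "(":
--         left +=1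
--     else:
--         right += 1
--     for i in range(1, len(s)):
--         if s[i] == "(":
--             left += 1
--         else:
--             right += 1
--
--         if left == right:
--             break
--     u = s[0:i+1]
--     v = s[i+1:len(s)]
--     # 3
--     if isGood(u):
--         v = convert(v)
--         # 3-1
--         u += v
--         return u
--     # 4
--     else:
--         # 4-1, 4-2, 4-3
--         temp = "(" + convert(v) + ")"
--         # 4-4
--         u = u[1:-1]
--         for i in u:
--             if i == "(":
--                 temp += ")"
--             else:
--                 temp += "("
--         return temp
-- ===== SOURCE B (Python) =====
-- def is_balanced(u):
--     bal = 0
--     for c in u: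
--         bal += 1 if c == "(" else -1
--         if bal < 0:
--             return False
--     return bal == 0
--
-- def convert(s):
--     # phase 1: split s into shortest blocks ending where the running balance hits 0
--     blocks = []
--     cur = []
--     bal = 0
--     for c in s:
--         cur.append(c)
--         bal += 1 if c == "(" else -1
--         if bal == 0:
--             blocks.append("".join(cur))
--             cur = []
--     if cur:
--         blocks.append("".join(cur))
--     # phase 2: fold the blocks from right to left
--     acc = ""
--     for u in reversed(blocks):
--         if is_balanced(u):
--             acc = u + acc
--         else:
--             acc = "(" + acc + ")" + "".join(")" if c == "(" else "(" for c in u[1:-1])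
--     return acc
-- ===== Notes on version B (the rewrite author's own statement) =====
-- stated objective: alternative
-- what changed: A's top-down recursion (re-scan for the cut point, recurse on the tail inside each branch) is replaced by a two-phase pass: one linear scan splits s into its shortest balance-zero blocks, then a single right-to-left fold over the block list assembles the answer.
-- outside the precondition, e.g. on convert('('): A raises UnboundLocalError, B returns '()'
import Mathlib
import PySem

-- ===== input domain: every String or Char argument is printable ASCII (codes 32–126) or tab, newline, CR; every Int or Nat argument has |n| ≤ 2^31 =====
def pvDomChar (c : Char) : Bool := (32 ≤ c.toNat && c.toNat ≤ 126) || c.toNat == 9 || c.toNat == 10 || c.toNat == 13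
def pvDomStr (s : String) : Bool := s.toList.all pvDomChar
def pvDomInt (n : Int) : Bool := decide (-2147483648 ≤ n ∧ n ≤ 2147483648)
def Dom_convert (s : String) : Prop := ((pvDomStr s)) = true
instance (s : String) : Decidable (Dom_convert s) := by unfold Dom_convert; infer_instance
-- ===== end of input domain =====

-- B replaces A's recursion by an explicit two-phase pass (split into shortest balance-zero
-- blocks, then fold them right-to-left); objective: alternative decomposition, same cost.


-- ===== PORT A =====
-- isGood's for-loop: left/right counters plus the explicit stack of '(' characters.
def isGoodGo : List Char → Int → Int → List Char → Bool
  | [], left, right, stack => left == right && stack == []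
  | c :: rest, left, right, stack =>
      if c = '(' then isGoodGo rest (left + 1) right (c :: stack)
      else if stack = [] then false
      else isGoodGo rest left (right + 1) stack.tail

def isGoodA (s : List Char) : Bool := isGoodGo s 0 0 []

-- convert's for-loop over i in range(1, len(s)): returns the value i has after the loop
-- (the break index, or len(s)-1 when the loop runs out).
def findCut : List Char → Int → Int → Int → Int
  | [], i, _, _ => i - 1
  | c :: rest, i, left, right =>
      let left := if c = '(' then left + 1 else left
      let right := if c = '(' then right else right + 1
      if left = right then i else findCut rest (i + 1) left right

-- needed by convA's decreasing_by
theorem findCut_ge (rest : List Char) (i left right : Int) : i - 1 ≤ findCut rest i left right := by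
  induction rest generalizing i left right with
  | nil => simp [findCut]
  | cons c t ih =>
      by_cases hc : c = '(' <;> simp only [findCut, hc, reduceIte] <;> split
      · omega
      · refine le_trans ?_ (ih (i + 1) _ _); omega
      · omega
      · refine le_trans ?_ (ih (i + 1) _ _); omega

-- needed by convA's decreasing_by
theorem findCut_one_ge (rest : List Char) (left right : Int) :
    1 ≤ findCut rest 1 left right + 1 := by
  have := findCut_ge rest 1 left right; omega

-- needed by convA's decreasing_by
theorem slice_tail_lt (cs : List Char) (a : Int) (h : 1 ≤ a) (hcs : cs ≠ []) :
    (PySem.List.slice cs (some a) (some (cs.length : Int))).length < cs.length := by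
  have hl : cs.length ≠ 0 := by simpa using hcs
  simp [PySem.List.length_slice, PySem.List.clampIdx,
    show ¬ a < 0 by omega, show ¬ ((cs.length : Int) < 0) by omega]
  omega

def convA (cs : List Char) : List Char :=
  match hcs : cs with
  | [] => cs
  | c :: rest =>
      let left : Int := if c = '(' then 1 else 0
      let right : Int := if c = '(' then 0 else 1
      let i := findCut rest 1 left right
      let u := PySem.List.slice cs (some 0) (some (i + 1))
      let v := PySem.List.slice cs (some (i + 1)) (some (cs.length : Int))
      if isGoodA u then u ++ convA v
      else
        let temp := '(' :: convA v ++ [')']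
        (PySem.List.slice u (some 1) (some (-1))).foldl
          (fun t ch => t ++ [if ch = '(' then ')' else '(']) temp
  termination_by cs.length
  decreasing_by
    all_goals
      rw [hcs]
      exact slice_tail_lt (c :: rest) _ (findCut_one_ge rest _ _) (by simp)

def convert (s : String) : String := String.ofList (convA s.toList)

-- ===== PORT B =====
def isBalGo : List Char → Int → Bool
  | [], bal => bal == 0
  | c :: rest, bal =>
      let bal := bal + (if c = '(' then 1 else -1)
      if bal < 0 then false else isBalGo rest bal

def isBalanced (u : List Char) : Bool := isBalGo u 0

def splitBlocks : List Char → List Char → Int → List (List Char)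
  | [], cur, _ => if cur = [] then [] else [cur]
  | c :: rest, cur, bal =>
      let cur := cur ++ [c]
      let bal := bal + (if c = '(' then 1 else -1)
      if bal = 0 then cur :: splitBlocks rest [] 0 else splitBlocks rest cur bal

def stepB (acc u : List Char) : List Char :=
  if isBalanced u then u ++ acc
  else '(' :: acc ++ ')' :: (PySem.List.slice u (some 1) (some (-1))).map
    (fun c => if c = '(' then ')' else '(')

def convert_alt (s : String) : String :=
  String.ofList ((splitBlocks s.toList [] 0).reverse.foldl stepB [])

-- ===== PRECONDITION & SPEC =====
def pbal (cs : List Char) : Int := cs.foldl (fun b c => b + (if c = '(' then 1 else -1)) 0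

-- Pre_ excludes exactly the inputs where Python A raises UnboundLocalError: a nonempty s whose
-- running balance ('(' = +1, any other char = -1) over all but its last character is 0, so A's
-- recursion reaches a length-1 string whose range(1, 1) loop leaves i unassigned.
def Pre_convert (s : String) : Prop := s.toList = [] ∨ pbal s.toList.dropLast ≠ 0
instance (s : String) : Decidable (Pre_convert s) := by unfold Pre_convert; infer_instance

def pvWitness_convert : String := "(())"

def Spec_convert (s : String) (out : String) : Prop := out = convert_alt s
instance (s : String) (out : String) : Decidable (Spec_convert s out) := by unfold Spec_convert; infer_instance

-- ===== CLAIM (what is proved, stated in full; the proofs are below) =====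
def Claim_equal_convert : Prop := ∀ (s : String), Dom_convert s → Pre_convert s → Spec_convert s (convert s)

-- ===== LEMMAS AND PROOFS =====

-- number of characters a block-scan starting at balance b consumes before first hitting
-- balance 0 (all of them if it never does)
def cutSpec : List Char → Int → Nat
  | [], _ => 0
  | c :: t, b =>
      if b + (if c = '(' then 1 else -1) = 0 then 1
      else 1 + cutSpec t (b + (if c = '(' then 1 else -1))

theorem findCut_eq_cutSpec (rest : List Char) (i left right : Int) :
    findCut rest i left right = i + (cutSpec rest (left - right) : Int) - 1 := by
  induction rest generalizing i left right with
  | nil => simp [findCut, cutSpec]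
  | cons c t ih =>
      by_cases hc : c = '('
      · simp only [findCut, cutSpec, hc, reduceIte]
        by_cases hz : left + 1 = right
        · rw [if_pos hz, if_pos (by omega)]; omega
        · rw [if_neg hz, if_neg (by omega), ih,
            show left - right + 1 = left + 1 - right by ring]
          push_cast; omega
      · simp only [findCut, cutSpec, hc, reduceIte]
        by_cases hz : left = right + 1
        · rw [if_pos hz, if_pos (by omega)]; omega
        · rw [if_neg hz, if_neg (by omega), ih,
            show left - right + -1 = left - (right + 1) by ring]
          push_cast; omega

theorem cutSpec_le (rest : List Char) (b : Int) : cutSpec rest b ≤ rest.length := by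
  induction rest generalizing b with
  | cons c t ih =>
      by_cases hc : c = '(' <;> simp only [cutSpec, List.length_cons, hc, reduceIte] <;> split
      · omega
      · have := ih (b + 1); omega
      · omega
      · have := ih (b + -1); omega
  | nil => simp [cutSpec]

theorem splitBlocks_step (rest : List Char) (cur : List Char) (b : Int)
    (hb : b ≠ 0) (hcur : cur ≠ []) :
    splitBlocks rest cur b =
      (cur ++ rest.take (cutSpec rest b)) :: splitBlocks (rest.drop (cutSpec rest b)) [] 0 := by
  induction rest generalizing cur b with
  | nil => simp [splitBlocks, cutSpec, hcur]
  | cons c t ih =>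
      by_cases hc : c = '(' <;> simp only [splitBlocks, cutSpec, hc, reduceIte]
      · by_cases hz : b + 1 = 0
        · simp [hz]
        · rw [if_neg hz, if_neg hz, ih _ _ hz (by simp),
            show 1 + cutSpec t (b + 1) = cutSpec t (b + 1) + 1 from Nat.add_comm _ _,
            List.take_succ_cons, List.drop_succ_cons]
          simp
      · by_cases hz : b + -1 = 0
        · simp [hz]
        · rw [if_neg hz, if_neg hz, ih _ _ hz (by simp),
            show 1 + cutSpec t (b + -1) = cutSpec t (b + -1) + 1 from Nat.add_comm _ _,
            List.take_succ_cons, List.drop_succ_cons]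
          simp

theorem isGoodGo_eq_isBalGo (u : List Char) (st : List Char) (left right : Int)
    (h : left - right = (st.length : Int)) :
    isGoodGo u left right st = isBalGo u (st.length : Int) := by
  induction u generalizing st left right with
  | nil =>
      simp only [isGoodGo, isBalGo]
      cases st with
      | nil =>
          have h1 : (left == right) = true := by simp at h ⊢; omega
          simp [h1]
      | cons x st' =>
          have h1 : (left == right) = false := by
            simp only [List.length_cons] at h; push_cast at h; simp; omega
          simp only [h1, Bool.false_and]
          simp only [List.length_cons]
          push_cast
          simp
          omega
  | cons c rest ih =>
      by_cases hc : c = '(' <;> simp only [isGoodGo, isBalGo, hc, reduceIte]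
      · rw [if_neg (by omega : ¬ (st.length : Int) + 1 < 0),
          show ((st.length : Int) + 1) = ((('(' :: st).length : Nat) : Int) by
            simp only [List.length_cons]; push_cast; ring]
        exact ih ('(' :: st) (left + 1) right
          (by simp only [List.length_cons]; push_cast; omega)
      · cases st with
        | nil =>
            rw [if_pos rfl, if_pos (by norm_num)]
        | cons x st' =>
            rw [if_neg (by simp), if_neg (by simp only [List.length_cons]; push_cast; omega),
              show (((x :: st').length : Int) + -1) = ((st'.length : Nat) : Int) by
                simp only [List.length_cons]; push_cast; ring]
            exact ih st' left (right + 1)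
              (by simp only [List.length_cons] at h; push_cast at h ⊢; omega)

theorem foldl_flip (mid temp : List Char) :
    mid.foldl (fun t ch => t ++ [if ch = '(' then ')' else '(']) temp
      = temp ++ mid.map (fun c => if c = '(' then ')' else '(') :=
  PySem.List.foldl_append_singleton_eq_map _ mid temp

theorem convA_eq_fold (cs : List Char) :
    convA cs = (splitBlocks cs [] 0).reverse.foldl stepB [] := by
  generalize hn : cs.length = n
  induction n using Nat.strong_induction_on generalizing cs with
  | _ n ih =>
  cases cs with
  | nil => simp [convA, splitBlocks]
  | cons c rest =>
    have hb0 : (if c = '(' then (1:Int) else -1) ≠ 0 := by split <;> omega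
    set b0 : Int := if c = '(' then 1 else -1 with hb0def
    set k : Nat := cutSpec rest b0 with hk
    have hkle : k ≤ rest.length := cutSpec_le rest b0
    -- the cut index computed by A's loop
    have hi : findCut rest 1 (if c = '(' then 1 else 0) (if c = '(' then 0 else 1) = (k : Int) := by
      have hd : (if c = '(' then (1:Int) else 0) - (if c = '(' then (0:Int) else 1) = b0 := by
        rw [hb0def]; split <;> ring
      rw [findCut_eq_cutSpec, hd]
      omega
    -- A's u and v as take/drop
    have hu : PySem.List.slice (c :: rest) (some 0) (some ((k:Int) + 1)) = c :: rest.take k := by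
      rw [PySem.List.slice_zero_start, PySem.List.slice_to _ (by omega : (0:Int) ≤ (k:Int) + 1),
        show ((k:Int) + 1).toNat = k + 1 by omega, List.take_succ_cons]
    have hv : PySem.List.slice (c :: rest) (some ((k:Int) + 1)) (some ((c :: rest).length : Int))
        = rest.drop k := by
      rw [show ((k:Int) + 1) = ((k + 1 : Nat) : Int) by push_cast; ring,
        PySem.List.slice_natCast, List.drop_succ_cons, List.take_of_length_le]
      simp only [List.length_drop, List.length_cons]
      omega
    -- the first block of B's splitter is exactly A's u
    have hsb : splitBlocks (c :: rest) [] 0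
        = (c :: rest.take k) :: splitBlocks (rest.drop k) [] 0 := by
      simp only [splitBlocks, List.nil_append, zero_add, ← hb0def, if_neg hb0]
      rcases List.eq_nil_or_concat rest with hr | _
      · subst hr
        simp only [cutSpec] at hk
        simp [splitBlocks, hk]
      · rw [splitBlocks_step rest [c] b0 hb0 (by simp), ← hk]
        simp
    -- induction hypothesis for v
    have hvlen : (rest.drop k).length < n := by
      simp only [List.length_drop]
      simp only [List.length_cons] at hn
      omega
    have hIH : convA (rest.drop k) = (splitBlocks (rest.drop k) [] 0).reverse.foldl stepB [] :=
      ih _ hvlen _ rfl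
    rw [convA]
    simp only [hi, hu, hv, hsb, List.reverse_cons, List.foldl_append, List.foldl_cons,
      List.foldl_nil, ← hIH]
    rw [show isGoodA (c :: rest.take k) = isBalanced (c :: rest.take k) from by
      unfold isGoodA isBalanced
      simpa using isGoodGo_eq_isBalGo (c :: rest.take k) [] 0 0 (by simp)]
    unfold stepB
    by_cases hbal : isBalanced (c :: rest.take k) = true
    · rw [if_pos hbal, if_pos hbal]
    · rw [if_neg hbal, if_neg hbal, foldl_flip]
      simp

theorem convert_agrees (s : String) : convert s = convert_alt s := by
  unfold convert convert_alt
  rw [convA_eq_fold]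

-- ===== VERDICT (by name: the statement is the Claim_ definition above) =====
theorem convert_spec : Claim_equal_convert := by
  intro s _ _
  unfold Spec_convert
  exact convert_agrees s
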